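-- pv_equiv track=rewrite | github.com/veritas1209/Dreamhack | solved/2276/solve.py | matches_clue
-- ===== SOURCE A (Python) =====
-- def matches_clue(line, clue):
--     """라인이 단서와 일치하는지 확인"""
--     blocks = []
--     current_block = 0
--
--     for cell in line:
--         if cell == 1:
--             current_block += 1
--         else:
--             if current_block > 0:
--                 blocks.append(current_block)
--                 current_block = 0
--
--     if current_block > 0:
--         blocks.append(current_block)
--
--     return blocks == clue
-- ===== SOURCE B (Python) =====
-- def matches_clue(line, clue):
--     """라인이 단서와 일치하는지 확인"""
--     blocks = [len(b) for b in ''.join('1' if c == 1 else '0' for c in line).split('0') if b]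
--     return blocks == clue
-- ===== Notes on version B (the rewrite author's own statement) =====
-- stated objective: idiomatic
-- what changed: Replaces the stateful current_block accumulator loop with its end-of-line flush branch by a build-then-split decomposition: map cells to a '1'/'0' string, split on '0', and take lengths of the nonempty pieces.
import Mathlib
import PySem

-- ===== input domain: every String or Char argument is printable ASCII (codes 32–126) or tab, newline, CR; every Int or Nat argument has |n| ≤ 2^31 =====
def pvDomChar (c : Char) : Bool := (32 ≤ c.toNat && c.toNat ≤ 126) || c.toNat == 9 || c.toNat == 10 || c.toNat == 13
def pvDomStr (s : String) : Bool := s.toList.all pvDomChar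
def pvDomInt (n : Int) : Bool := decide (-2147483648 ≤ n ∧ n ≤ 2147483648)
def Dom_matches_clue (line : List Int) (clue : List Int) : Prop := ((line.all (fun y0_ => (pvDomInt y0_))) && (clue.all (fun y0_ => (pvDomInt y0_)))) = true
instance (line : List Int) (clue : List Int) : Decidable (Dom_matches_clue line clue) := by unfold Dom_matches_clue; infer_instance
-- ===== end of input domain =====

-- B replaces A's stateful run-accumulator loop (with its end-of-line flush) by an
-- idiomatic build-then-split decomposition: map cells to a '1'/'0' string, split on '0',
-- and compare the lengths of the nonempty pieces with the clue.

-- ===== PORT A =====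
-- the for-loop's state: (blocks, current_block)
def matchesClueStep (s : List Int × Int) (cell : Int) : List Int × Int :=
  if cell = 1 then (s.1, s.2 + 1)
  else if s.2 > 0 then (s.1 ++ [s.2], 0) else s

def matches_clue (line : List Int) (clue : List Int) : Bool :=
  let s := line.foldl matchesClueStep ([], 0)
  let blocks := if s.2 > 0 then s.1 ++ [s.2] else s.1
  decide (blocks = clue)

-- ===== PORT B =====
-- ''.join('1' if c == 1 else '0' for c in line): the joined string as its list of chars
def matchesClueChars (line : List Int) : List Char :=
  line.map (fun c => if c = 1 then '1' else '0')

-- [len(b) for b in pieces if b]: lengths (as Python ints) of the nonempty pieces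
def matchesClueLens (pieces : List (List Char)) : List Int :=
  pieces.filterMap (fun b => if b ≠ [] then some (b.length : Int) else none)

-- str.split('0') on the joined string = List.splitOn '0' on its chars (exact: Python's
-- one-separator split keeps empty pieces, as List.splitOn does)
def matches_clue_alt (line : List Int) (clue : List Int) : Bool :=
  decide (matchesClueLens ((matchesClueChars line).splitOn '0') = clue)

-- ===== PRECONDITION & SPEC =====
def Spec_matches_clue (line : List Int) (clue : List Int) (out : Bool) : Prop := out = matches_clue_alt line clue
instance (line : List Int) (clue : List Int) (out : Bool) : Decidable (Spec_matches_clue line clue out) := by unfold Spec_matches_clue; infer_instance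

-- ===== CLAIM (what is proved, stated in full; the proofs are below) =====
def Claim_equal_matches_clue : Prop := ∀ (line : List Int) (clue : List Int), Dom_matches_clue line clue → Spec_matches_clue line clue (matches_clue line clue)

-- ===== LEMMAS AND PROOFS =====

-- the blocks of `line` when a run of length `cur` is already open
def runBlocks (line : List Int) (cur : Int) : List Int :=
  match line with
  | [] => if cur > 0 then [cur] else []
  | c :: rest =>
      if c = 1 then runBlocks rest (cur + 1)
      else if cur > 0 then cur :: runBlocks rest 0 else runBlocks rest 0

-- matchesClueLens with the first piece extended by an already-open run of length cur
def lensExt (cur : Int) (pieces : List (List Char)) : List Int :=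
  match pieces with
  | [] => []
  | p :: ps => if cur + (p.length : Int) > 0 then (cur + (p.length : Int)) :: matchesClueLens ps
               else matchesClueLens ps

theorem lensExt_zero (pieces : List (List Char)) :
    lensExt 0 pieces = matchesClueLens pieces := by
  cases pieces with
  | nil => rfl
  | cons p ps =>
      simp only [lensExt, matchesClueLens, List.filterMap, zero_add]
      by_cases hpn : p = []
      · subst hpn; simp
      · have hlen : (0:Int) < (p.length : Int) := by
          have := List.length_pos_iff.mpr hpn; push_cast; omega
        rw [if_pos hlen]
        simp [hpn]

-- A's loop + flush computes blocks ++ runBlocks line cur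
theorem foldl_matchesClueStep (line : List Int) (blocks : List Int) (cur : Int)
    (hcur : 0 ≤ cur) :
    (if (line.foldl matchesClueStep (blocks, cur)).2 > 0
     then (line.foldl matchesClueStep (blocks, cur)).1 ++ [(line.foldl matchesClueStep (blocks, cur)).2]
     else (line.foldl matchesClueStep (blocks, cur)).1) = blocks ++ runBlocks line cur := by
  induction line generalizing blocks cur with
  | nil => simp only [List.foldl, runBlocks]; split <;> simp
  | cons c rest ih =>
      simp only [List.foldl, matchesClueStep, runBlocks]
      by_cases h1 : c = 1
      · rw [if_pos h1, if_pos h1]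
        exact ih blocks (cur + 1) (by omega)
      · rw [if_neg h1, if_neg h1]
        by_cases h2 : cur > 0
        · rw [if_pos h2, if_pos h2]
          rw [ih (blocks ++ [cur]) 0 le_rfl]
          simp
        · rw [if_neg h2, if_neg h2]
          have : cur = 0 := by omega
          subst this
          exact ih blocks 0 le_rfl

-- B's split, with an open run of length cur ≥ 0 merged into the first piece,
-- computes runBlocks line cur
theorem lens_splitOn (line : List Int) (cur : Int) (hcur : 0 ≤ cur) :
    lensExt cur ((matchesClueChars line).splitOn '0') = runBlocks line cur := by
  induction line generalizing cur with
  | nil =>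
      simp only [matchesClueChars, List.map_nil, List.splitOn, List.splitOnP_nil,
        lensExt, runBlocks, matchesClueLens, List.filterMap, List.length_nil,
        Int.natCast_zero, add_zero]
  | cons c rest ih =>
      have hne := List.splitOnP_ne_nil (p := fun x => x == '0')
        (rest.map (fun c : Int => if c = 1 then '1' else '0'))
      rcases hp : (rest.map (fun c : Int => if c = 1 then '1' else '0')).splitOnP
          (fun x => x == '0') with _ | ⟨p, ps⟩
      · exact absurd hp hne
      by_cases h1 : c = 1
      · have hL : (matchesClueChars (c :: rest)).splitOn '0' = ('1' :: p) :: ps := by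
          simp only [matchesClueChars, List.map_cons, if_pos h1, List.splitOn,
            List.splitOnP_cons, hp]
          simp [List.modifyHead]
        have hcc : (matchesClueChars rest).splitOn '0' = p :: ps := by
          simpa only [matchesClueChars, List.splitOn] using hp
        rw [hL]
        simp only [runBlocks, if_pos h1, lensExt, List.length_cons]
        have hih := ih (cur + 1) (by omega)
        rw [hcc] at hih
        simp only [lensExt] at hih
        have hlp : (0:Int) ≤ (p.length : Int) := Int.natCast_nonneg _
        rw [show (cur + ((p.length + 1 : Nat) : Int)) = cur + 1 + (p.length : Int) by
          omega]
        rw [if_pos (by omega)]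
        rw [if_pos (by omega)] at hih
        rw [hih]
      · have hL : (matchesClueChars (c :: rest)).splitOn '0' = [] :: p :: ps := by
          simp only [matchesClueChars, List.map_cons, if_neg h1, List.splitOn,
            List.splitOnP_cons, hp]
          simp [List.modifyHead]
        have hcc : (matchesClueChars rest).splitOn '0' = p :: ps := by
          simpa only [matchesClueChars, List.splitOn] using hp
        rw [hL]
        simp only [runBlocks, if_neg h1, lensExt, List.length_nil, Int.natCast_zero, add_zero]
        have hih := ih 0 le_rfl
        rw [hcc, lensExt_zero (p :: ps)] at hih
        by_cases h2 : cur > 0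
        · rw [if_pos h2, if_pos h2, hih]
        · rw [if_neg h2, if_neg h2, hih]

theorem blocks_eq (line : List Int) :
    (if (line.foldl matchesClueStep ([], 0)).2 > 0
     then (line.foldl matchesClueStep ([], 0)).1 ++ [(line.foldl matchesClueStep ([], 0)).2]
     else (line.foldl matchesClueStep ([], 0)).1) =
    matchesClueLens ((matchesClueChars line).splitOn '0') := by
  rw [foldl_matchesClueStep line [] 0 le_rfl, List.nil_append,
    ← lens_splitOn line 0 le_rfl, lensExt_zero]

-- ===== VERDICT (by name: the statement is the Claim_ definition above) =====
theorem matches_clue_spec : Claim_equal_matches_clue := by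
  intro line clue _
  unfold Spec_matches_clue matches_clue matches_clue_alt
  simp only [blocks_eq]
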